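-- pv_equiv track=rewrite | github.com/ShivamShah1/Curve_detection_FPGA_GUI | pyPCIe/feature_test.py | count_spikes
-- ===== SOURCE A (Python) =====
-- def count_spikes(samples, threshold=2250, end_threshold=2065):
--     spike_count = 0
--     in_spike = False  # Tracks whether we are inside a spike
--     spike_positions = []
--     spike_heights = []
--     spike_colors = []
--     max_sample = None
--     max_sample_index = None
--     spike_start_index = None
--
--     # Lists to hold the max sample index for each spike
--     max_sample_indices = []
--
--     for i, sample in enumerate(samples):
--         if abs(sample) > threshold and not in_spike:  # Start of a new spike
--             in_spike = True
--             spike_start_index = i  # Record the start index of the spike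
--             max_sample = sample
--             max_sample_index = i
--         elif in_spike:
--             if abs(sample) > abs(max_sample):  # Track the highest value within the spike
--                 max_sample = sample
--                 max_sample_index = i
--
--             if abs(sample) <= end_threshold:  # End of spike when value returns to or below end_threshold
--                 spike_count += 1  # Increment spike count
--                 spike_positions.append(spike_start_index)  # Position of the spike
--                 spike_heights.append(max_sample)  # Maximum height of the spike
--                 max_sample_indices.append(max_sample_index)  # Append the peak index
--
--                 # Assign color based on max_sample value
--                 if abs(max_sample) < 2100:
--                     spike_colors.append('blue')  # Low range
--                 elif 2100 <= abs(max_sample) < 2300: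
--                     spike_colors.append('lightblue')  # Soft blue
--                 elif 2500 <= abs(max_sample) < 3000:
--                     spike_colors.append('cyan')  # Light cyan for middle-low values
--                 elif 3000 <= abs(max_sample) < 3400:
--                     spike_colors.append('lightyellow')  # Soft yellow
--                 elif 3400 <= abs(max_sample) < 3600:
--                     spike_colors.append('yellow')  # Mid-range values
--                 elif 3600 <= abs(max_sample) < 3800:
--                     spike_colors.append('orange')  # Higher mid-range values
--                 elif 3800 <= abs(max_sample) < 4000:
--                     spike_colors.append('darkorange')  # Near-high range values
--                 else:
--                     spike_colors.append('red')  # High range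
--
--                 # Reset tracking variables after spike ends
--                 in_spike = False
--                 max_sample = None
--                 max_sample_index = None
--                 spike_start_index = None
--
--     return spike_count, spike_positions, spike_heights, spike_colors, max_sample_indices
-- ===== SOURCE B (Python) =====
-- def _spike_color(m):
--     if abs(m) < 2100:
--         return 'blue'
--     elif 2100 <= abs(m) < 2300:
--         return 'lightblue'
--     elif 2500 <= abs(m) < 3000:
--         return 'cyan'
--     elif 3000 <= abs(m) < 3400:
--         return 'lightyellow'
--     elif 3400 <= abs(m) < 3600:
--         return 'yellow'
--     elif 3600 <= abs(m) < 3800: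
--         return 'orange'
--     elif 3800 <= abs(m) < 4000:
--         return 'darkorange'
--     else:
--         return 'red'
--
--
-- def count_spikes(samples, threshold=2250, end_threshold=2065):
--     # Pass 1: segment the signal into closed spike windows (start index, samples).
--     segments = []
--     current = None  # (start_index, samples of the open spike)
--     for i, x in enumerate(samples):
--         if current is None:
--             if abs(x) > threshold:
--                 current = (i, [x])
--         else:
--             current[1].append(x)
--             if abs(x) <= end_threshold:
--                 segments.append(current)
--                 current = None
--     # An unterminated final spike is dropped.
--
--     # Pass 2: for each closed segment, find the signed peak (first strict-abs max).
--     positions, heights, colors, peak_indices = [], [], [], []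
--     for start, seg in segments:
--         peak, off = seg[0], 0
--         for k in range(1, len(seg)):
--             if abs(seg[k]) > abs(peak):
--                 peak, off = seg[k], k
--         positions.append(start)
--         heights.append(peak)
--         colors.append(_spike_color(peak))
--         peak_indices.append(start + off)
--
--     return len(segments), positions, heights, colors, peak_indices
-- ===== Notes on version B (the rewrite author's own statement) =====
-- stated objective: alternative
-- what changed: Replaced A's single-pass 9-variable state machine by a two-pass decomposition: first pass segments the signal into closed spike windows (start index, window samples), second pass computes each window's signed first-strict-abs-max peak and its index, then the per-window records are aggregated.
import Mathlib
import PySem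

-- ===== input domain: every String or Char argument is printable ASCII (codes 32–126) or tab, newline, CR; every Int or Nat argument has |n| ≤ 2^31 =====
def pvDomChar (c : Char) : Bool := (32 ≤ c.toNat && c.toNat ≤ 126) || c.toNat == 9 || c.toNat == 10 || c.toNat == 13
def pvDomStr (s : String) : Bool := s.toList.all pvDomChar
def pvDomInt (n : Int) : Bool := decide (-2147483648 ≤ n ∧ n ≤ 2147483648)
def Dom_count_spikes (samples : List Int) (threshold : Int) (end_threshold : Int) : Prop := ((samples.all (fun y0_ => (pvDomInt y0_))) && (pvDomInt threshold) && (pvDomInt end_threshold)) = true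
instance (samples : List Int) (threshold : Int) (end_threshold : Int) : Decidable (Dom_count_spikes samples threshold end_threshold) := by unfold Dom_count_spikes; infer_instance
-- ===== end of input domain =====

-- B replaces A's one-pass state machine by a two-pass decomposition (segment the
-- signal into closed spike windows, then compute each window's peak); objective:
-- alternative decomposition, same cost.

-- ===== PORT A =====
-- color chain shared by both ports (identical if/elif bound chain in both Pythons)
def pvColor (m : Int) : String :=
  if |m| < 2100 then "blue"
  else if 2100 ≤ |m| ∧ |m| < 2300 then "lightblue"
  else if 2500 ≤ |m| ∧ |m| < 3000 then "cyan"
  else if 3000 ≤ |m| ∧ |m| < 3400 then "lightyellow"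
  else if 3400 ≤ |m| ∧ |m| < 3600 then "yellow"
  else if 3600 ≤ |m| ∧ |m| < 3800 then "orange"
  else if 3800 ≤ |m| ∧ |m| < 4000 then "darkorange"
  else "red"

structure SpikeSt where
  cnt : Int
  pos : List Int
  hts : List Int
  cols : List String
  mids : List Int
  inSpike : Bool
  maxS : Option Int
  maxI : Option Int
  startI : Option Int
deriving Repr, DecidableEq

-- loop body of A (branches in source order; the `| _,_,_ => st` arm only makes the
-- match total: Python's in_spike=True state always carries non-None trackers)
def stepA (threshold end_threshold : Int) (i : Int) (sample : Int) (st : SpikeSt) : SpikeSt :=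
  if |sample| > threshold ∧ st.inSpike = false then
    { st with inSpike := true, startI := some i, maxS := some sample, maxI := some i }
  else if st.inSpike then
    match st.maxS, st.maxI, st.startI with
    | some m0, some mi0, some s0 =>
      let m := if |sample| > |m0| then sample else m0
      let mi := if |sample| > |m0| then i else mi0
      if |sample| ≤ end_threshold then
        { cnt := st.cnt + 1, pos := st.pos ++ [s0], hts := st.hts ++ [m],
          cols := st.cols ++ [pvColor m], mids := st.mids ++ [mi],
          inSpike := false, maxS := none, maxI := none, startI := none }
      else
        { st with maxS := some m, maxI := some mi }
    | _, _, _ => st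
  else st

def loopA (th et : Int) : List Int → Int → SpikeSt → SpikeSt
  | [], _, st => st
  | x :: rest, i, st => loopA th et rest (i + 1) (stepA th et i x st)

def count_spikes (samples : List Int) (threshold : Int) (end_threshold : Int) : Int × List Int × List Int × List String × List Int :=
  let fin := loopA threshold end_threshold samples 0 ⟨0, [], [], [], [], false, none, none, none⟩
  (fin.cnt, fin.pos, fin.hts, fin.cols, fin.mids)

-- ===== PORT B =====
-- pass 1: collect the closed spike windows (start index, samples of the window)
def segsLoop (th et : Int) : List Int → Int → Option (Int × List Int) → List (Int × List Int) → List (Int × List Int)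
  | [], _, _, acc => acc
  | x :: rest, i, none, acc =>
      if |x| > th then segsLoop th et rest (i + 1) (some (i, [x])) acc
      else segsLoop th et rest (i + 1) none acc
  | x :: rest, i, some (s, seg), acc =>
      if |x| ≤ et then segsLoop th et rest (i + 1) none (acc ++ [(s, seg ++ [x])])
      else segsLoop th et rest (i + 1) (some (s, seg ++ [x])) acc

-- peak scan: state is (peak, offset of peak, running offset)
def peakStep (st : Int × Int × Int) (y : Int) : Int × Int × Int :=
  if |y| > |st.1| then (y, st.2.2, st.2.2 + 1) else (st.1, st.2.1, st.2.2 + 1)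

def pvPeak : List Int → Int × Int
  | [] => (0, 0)   -- unreachable: segments are nonempty
  | x :: r =>
      let t := r.foldl peakStep (x, 0, 1)
      (t.1, t.2.1)

-- pass 2: one (position, height, color, peak index) record per closed segment
def pass2 : List (Int × List Int) → List Int × List Int × List String × List Int → List Int × List Int × List String × List Int
  | [], acc => acc
  | (s, seg) :: rest, acc =>
      let p := pvPeak seg
      pass2 rest (acc.1 ++ [s], acc.2.1 ++ [p.1], acc.2.2.1 ++ [pvColor p.1], acc.2.2.2 ++ [s + p.2])

def count_spikes_alt (samples : List Int) (threshold : Int) (end_threshold : Int) : Int × List Int × List Int × List String × List Int :=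
  let segs := segsLoop threshold end_threshold samples 0 none []
  let r := pass2 segs ([], [], [], [])
  ((segs.length : Int), r.1, r.2.1, r.2.2.1, r.2.2.2)

-- ===== PRECONDITION & SPEC =====
def Spec_count_spikes (samples : List Int) (threshold : Int) (end_threshold : Int) (out : Int × List Int × List Int × List String × List Int) : Prop := out = count_spikes_alt samples threshold end_threshold
instance (samples : List Int) (threshold : Int) (end_threshold : Int) (out : Int × List Int × List Int × List String × List Int) : Decidable (Spec_count_spikes samples threshold end_threshold out) := by unfold Spec_count_spikes; infer_instance

-- ===== CLAIM (what is proved, stated in full; the proofs are below) =====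
def Claim_equal_count_spikes : Prop := ∀ (samples : List Int) (threshold : Int) (end_threshold : Int), Dom_count_spikes samples threshold end_threshold → Spec_count_spikes samples threshold end_threshold (count_spikes samples threshold end_threshold)

-- ===== LEMMAS AND PROOFS =====

lemma segsLoop_acc (th et : Int) : ∀ (rest : List Int) (i : Int) (o : Option (Int × List Int)) (acc : List (Int × List Int)),
    segsLoop th et rest i o acc = acc ++ segsLoop th et rest i o [] := by
  intro rest
  induction rest with
  | nil =>
    intro i o acc
    cases o with
    | none => simp [segsLoop]
    | some p => cases p; simp [segsLoop]
  | cons x rest ih =>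
    intro i o acc
    cases o with
    | none =>
      by_cases hx : |x| > th
      · simp only [segsLoop, if_pos hx]; exact ih _ _ _
      · simp only [segsLoop, if_neg hx]; exact ih _ _ _
    | some p =>
      obtain ⟨s, seg⟩ := p
      by_cases hc : |x| ≤ et
      · simp only [segsLoop, if_pos hc]
        rw [ih _ _ (acc ++ [(s, seg ++ [x])]), ih _ _ ([] ++ [(s, seg ++ [x])])]
        simp [List.append_assoc]
      · simp only [segsLoop, if_neg hc]; exact ih _ _ _

lemma pass2_eq : ∀ (segs : List (Int × List Int)) (a b : List Int) (c : List String) (d : List Int),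
    pass2 segs (a, b, c, d) =
      (a ++ segs.map (fun z => z.1),
       b ++ segs.map (fun z => (pvPeak z.2).1),
       c ++ segs.map (fun z => pvColor (pvPeak z.2).1),
       d ++ segs.map (fun z => z.1 + (pvPeak z.2).2)) := by
  intro segs
  induction segs with
  | nil => intro a b c d; simp [pass2]
  | cons z rest ih =>
    intro a b c d
    obtain ⟨s, seg⟩ := z
    simp [pass2, ih]

lemma peak_third (r : List Int) : ∀ (p o k : Int), (r.foldl peakStep (p, o, k)).2.2 = k + (r.length : Int) := by
  induction r with
  | nil => intro p o k; simp
  | cons y r ih =>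
    intro p o k
    by_cases hy : |y| > |p| <;> simp [peakStep, hy, ih] <;> omega

lemma pvPeak_append (seg : List Int) (y : Int) (h : seg ≠ []) :
    pvPeak (seg ++ [y]) =
      if |y| > |(pvPeak seg).1| then (y, (seg.length : Int)) else pvPeak seg := by
  obtain ⟨x, r, rfl⟩ : ∃ x r, seg = x :: r := by
    cases seg with
    | nil => exact absurd rfl h
    | cons x r => exact ⟨x, r, rfl⟩
  have h3 := peak_third r x 0 1
  simp only [pvPeak, List.cons_append, List.foldl_append, List.foldl_cons, List.foldl_nil]
  set t := r.foldl peakStep (x, 0, 1) with ht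
  by_cases hy : |y| > |t.1| <;> simp [peakStep, hy, h3] <;> omega

def outOf (st : SpikeSt) : Int × List Int × List Int × List String × List Int :=
  (st.cnt, st.pos, st.hts, st.cols, st.mids)

def finish (cnt : Int) (pos hts : List Int) (cols : List String) (mids : List Int)
    (segs : List (Int × List Int)) : Int × List Int × List Int × List String × List Int :=
  (cnt + (segs.length : Int),
   pos ++ segs.map (fun z => z.1),
   hts ++ segs.map (fun z => (pvPeak z.2).1),
   cols ++ segs.map (fun z => pvColor (pvPeak z.2).1),
   mids ++ segs.map (fun z => z.1 + (pvPeak z.2).2))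

lemma finish_cons (cnt : Int) (pos hts : List Int) (cols : List String) (mids : List Int)
    (s : Int) (seg : List Int) (S : List (Int × List Int)) :
    finish cnt pos hts cols mids ((s, seg) :: S)
      = finish (cnt + 1) (pos ++ [s]) (hts ++ [(pvPeak seg).1])
          (cols ++ [pvColor (pvPeak seg).1]) (mids ++ [s + (pvPeak seg).2]) S := by
  simp only [finish, List.map_cons, List.length_cons, Prod.mk.injEq]
  refine ⟨by push_cast; ring, by simp, by simp, by simp, by simp⟩

lemma loopA_main (th et : Int) : ∀ (rest : List Int) (i cnt : Int) (pos hts : List Int) (cols : List String) (mids : List Int),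
    (outOf (loopA th et rest i ⟨cnt, pos, hts, cols, mids, false, none, none, none⟩)
        = finish cnt pos hts cols mids (segsLoop th et rest i none []))
    ∧ (∀ (s : Int) (seg : List Int), seg ≠ [] → i = s + (seg.length : Int) →
        outOf (loopA th et rest i ⟨cnt, pos, hts, cols, mids, true, some (pvPeak seg).1, some (s + (pvPeak seg).2), some s⟩)
          = finish cnt pos hts cols mids (segsLoop th et rest i (some (s, seg)) [])) := by
  intro rest
  induction rest with
  | nil =>
    intro i cnt pos hts cols mids
    constructor
    · simp [loopA, segsLoop, outOf, finish]
    · intro s seg _ _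
      simp [loopA, segsLoop, outOf, finish]
  | cons x rest ih =>
    intro i cnt pos hts cols mids
    constructor
    · -- closed state at x
      by_cases hx : |x| > th
      · -- spike opens at i
        have hstep : stepA th et i x ⟨cnt, pos, hts, cols, mids, false, none, none, none⟩
            = ⟨cnt, pos, hts, cols, mids, true, some x, some i, some i⟩ := by
          simp [stepA, hx]
        have hpk : pvPeak [x] = (x, 0) := by simp [pvPeak]
        have h1 := (ih (i + 1) cnt pos hts cols mids).2 i [x] (by simp) (by simp)
        rw [hpk] at h1
        simpa [loopA, hstep, segsLoop, hx] using h1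
      · have hstep : stepA th et i x ⟨cnt, pos, hts, cols, mids, false, none, none, none⟩
            = ⟨cnt, pos, hts, cols, mids, false, none, none, none⟩ := by
          simp [stepA, hx]
        have h1 := (ih (i + 1) cnt pos hts cols mids).1
        simpa [loopA, hstep, segsLoop, hx] using h1
    · -- open state at x
      intro s seg hne hi
      have hpk := pvPeak_append seg x hne
      by_cases hup : |x| > |(pvPeak seg).1|
      · have hpk' : pvPeak (seg ++ [x]) = (x, (seg.length : Int)) := by rw [hpk]; simp [hup]
        by_cases hc : |x| ≤ et
        · -- peak updates to x, segment closes
          have hstep : stepA th et i x ⟨cnt, pos, hts, cols, mids, true, some (pvPeak seg).1, some (s + (pvPeak seg).2), some s⟩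
              = ⟨cnt + 1, pos ++ [s], hts ++ [x], cols ++ [pvColor x], mids ++ [i], false, none, none, none⟩ := by
            simp [stepA, hup, hc]
          have h1 := (ih (i + 1) (cnt + 1) (pos ++ [s]) (hts ++ [x]) (cols ++ [pvColor x]) (mids ++ [i])).1
          simp only [loopA, hstep, segsLoop, if_pos hc, List.nil_append]
          rw [h1, show segsLoop th et rest (i + 1) none [(s, seg ++ [x])] = (s, seg ++ [x]) :: segsLoop th et rest (i + 1) none [] by rw [segsLoop_acc]; simp]
          rw [finish_cons, hpk']
          simp [hi]
        · -- peak updates to x, spike continues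
          have hstep : stepA th et i x ⟨cnt, pos, hts, cols, mids, true, some (pvPeak seg).1, some (s + (pvPeak seg).2), some s⟩
              = ⟨cnt, pos, hts, cols, mids, true, some x, some i, some s⟩ := by
            simp [stepA, hup, hc]
          have h1 := (ih (i + 1) cnt pos hts cols mids).2 s (seg ++ [x]) (by simp)
              (by simp only [List.length_append, List.length_cons, List.length_nil]; push_cast; omega)
          have hm : (pvPeak (seg ++ [x])).1 = x := by rw [hpk']
          have hmi : s + (pvPeak (seg ++ [x])).2 = i := by rw [hpk']; omega
          rw [hm, hmi] at h1
          simp only [loopA, hstep, segsLoop, if_neg hc]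
          exact h1
      · have hpk' : pvPeak (seg ++ [x]) = pvPeak seg := by rw [hpk]; simp [hup]
        by_cases hc : |x| ≤ et
        · -- peak unchanged, segment closes
          have hstep : stepA th et i x ⟨cnt, pos, hts, cols, mids, true, some (pvPeak seg).1, some (s + (pvPeak seg).2), some s⟩
              = ⟨cnt + 1, pos ++ [s], hts ++ [(pvPeak seg).1], cols ++ [pvColor (pvPeak seg).1], mids ++ [s + (pvPeak seg).2], false, none, none, none⟩ := by
            simp [stepA, hup, hc]
          have h1 := (ih (i + 1) (cnt + 1) (pos ++ [s]) (hts ++ [(pvPeak seg).1]) (cols ++ [pvColor (pvPeak seg).1]) (mids ++ [s + (pvPeak seg).2])).1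
          simp only [loopA, hstep, segsLoop, if_pos hc, List.nil_append]
          rw [h1, show segsLoop th et rest (i + 1) none [(s, seg ++ [x])] = (s, seg ++ [x]) :: segsLoop th et rest (i + 1) none [] by rw [segsLoop_acc]; simp]
          rw [finish_cons, hpk']
        · -- peak unchanged, spike continues
          have hstep : stepA th et i x ⟨cnt, pos, hts, cols, mids, true, some (pvPeak seg).1, some (s + (pvPeak seg).2), some s⟩
              = ⟨cnt, pos, hts, cols, mids, true, some (pvPeak seg).1, some (s + (pvPeak seg).2), some s⟩ := by
            simp [stepA, hup, hc]
          have h1 := (ih (i + 1) cnt pos hts cols mids).2 s (seg ++ [x]) (by simp)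
              (by simp only [List.length_append, List.length_cons, List.length_nil]; push_cast; omega)
          rw [hpk'] at h1
          simp only [loopA, hstep, segsLoop, if_neg hc]
          exact h1

-- ===== VERDICT (by name: the statement is the Claim_ definition above) =====
theorem count_spikes_spec : Claim_equal_count_spikes := by
  intro samples threshold end_threshold _
  show count_spikes samples threshold end_threshold = count_spikes_alt samples threshold end_threshold
  have h := (loopA_main threshold end_threshold samples 0 0 [] [] [] []).1
  simp only [count_spikes, count_spikes_alt, pass2_eq]
  simpa [outOf, finish] using h
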